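-- pv_equiv track=rewrite | github.com/solenova0/Leetcode | 2943-maximize-area-of-square-hole-in-grid/2943-maximize-area-of-square-hole-in-grid.py | maximizeSquareHoleArea
-- ===== SOURCE A (Python) =====
-- from typing import List
--
-- def maximizeSquareHoleArea(n: int, m: int, hBars: List[int], vBars: List[int]) -> int:
--         def max_gap(bars):
--             bars.sort()
--             longest = curr = 1
--
--             for i in range(1, len(bars)):
--                 if bars[i] == bars[i - 1] + 1:
--                     curr += 1
--                 else:
--                     longest = max(longest, curr)
--                     curr = 1
--
--             longest = max(longest, curr)
--             return longest + 1  # gap size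
--
--         max_h = max_gap(hBars)
--         max_v = max_gap(vBars)
--
--         side = min(max_h, max_v)
--         return side * side
-- ===== SOURCE B (Python) =====
-- # Boundary decomposition: collect the break positions of the sorted bars and take the
-- # largest distance between consecutive boundaries (like A, sorts the lists in place).
-- from typing import List
--
-- def maximizeSquareHoleArea(n: int, m: int, hBars: List[int], vBars: List[int]) -> int:
--     def max_gap(bars):
--         bars.sort()
--         cuts = [i for i in range(1, len(bars)) if bars[i] != bars[i - 1] + 1]
--         bounds = [0] + cuts + [len(bars)]
--         longest = max(b - a for a, b in zip(bounds, bounds[1:]))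
--         return longest + 1  # gap size
--
--     side = min(max_gap(hBars), max_gap(vBars))
--     return side * side
-- ===== Notes on version B (the rewrite author's own statement) =====
-- stated objective: alternative
-- what changed: Replaces the running-counter adjacent scan with a boundary decomposition: collect the break positions of the sorted bars and take the largest distance between consecutive boundaries; like A it sorts the lists in place.
-- intended difference: On inputs where hBars or vBars is empty, A returns an area of at least 4 (its counter starts at 1, counting a removable run in an empty list), while B counts a zero-length segment and returns area 1, the intended value since no bar can be removed there. — e.g. on maximizeSquareHoleArea(2, 2, [], []): A returns 4, B returns 1
import Mathlib
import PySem

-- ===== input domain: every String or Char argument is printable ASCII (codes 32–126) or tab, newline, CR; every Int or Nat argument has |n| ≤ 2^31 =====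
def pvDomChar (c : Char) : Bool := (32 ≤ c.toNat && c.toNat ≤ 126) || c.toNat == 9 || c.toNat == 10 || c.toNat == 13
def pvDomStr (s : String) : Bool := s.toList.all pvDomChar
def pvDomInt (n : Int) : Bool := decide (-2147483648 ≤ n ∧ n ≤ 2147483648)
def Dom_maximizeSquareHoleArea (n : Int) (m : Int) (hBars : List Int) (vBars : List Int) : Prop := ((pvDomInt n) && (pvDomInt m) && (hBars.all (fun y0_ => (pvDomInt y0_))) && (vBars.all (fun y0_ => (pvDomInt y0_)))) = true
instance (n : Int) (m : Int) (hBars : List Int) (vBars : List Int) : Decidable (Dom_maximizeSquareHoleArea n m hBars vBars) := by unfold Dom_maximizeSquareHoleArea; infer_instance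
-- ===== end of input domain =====

-- B replaces the running-counter adjacent scan by a boundary decomposition (break
-- positions of the sorted list, largest distance between consecutive boundaries);
-- like A it sorts its list arguments in place; intended difference on empty bar lists.

-- ===== PORT A =====
-- A's max_gap: sort in place, then 'for i in range(1, len(bars))' comparing bars[i] with bars[i-1].
def pvMaxGapA (bars : List Int) : Int :=
  let s := PySem.List.sorted bars (fun x => x) false
  let p := (PySem.List.pyRange 1 (s.length : Int) 1).foldl
    (fun (lc : Int × Int) i =>
      if PySem.List.pyGetD s i 0 == PySem.List.pyGetD s (i - 1) 0 + 1 then (lc.1, lc.2 + 1)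
      else (max lc.1 lc.2, 1)) (1, 1)
  max p.1 p.2 + 1

def maximizeSquareHoleArea (n : Int) (m : Int) (hBars : List Int) (vBars : List Int) : Int :=
  let maxH := pvMaxGapA hBars
  let maxV := pvMaxGapA vBars
  let side := min maxH maxV
  side * side

-- ===== PORT B =====
-- B's max_gap: sort, list the break positions, bracket them with 0 and len(bars), and
-- take the largest difference of consecutive boundaries. 'bounds' always has at least
-- the two entries 0 and len(bars), so Python's max sees a nonempty sequence and the
-- '.getD 0' default of the ported max? is never used.
def pvMaxGapB (bars : List Int) : Int :=
  let s := PySem.List.sorted bars (fun x => x) false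
  let cuts := (PySem.List.pyRange 1 (s.length : Int) 1).filter
    (fun i => !(PySem.List.pyGetD s i 0 == PySem.List.pyGetD s (i - 1) 0 + 1))
  let bounds := ((0 : Int) :: cuts) ++ [(s.length : Int)]
  let longest := (PySem.List.max? ((bounds.zip (bounds.drop 1)).map (fun p => p.2 - p.1))
    (fun x => x)).getD 0
  longest + 1

def maximizeSquareHoleArea_alt (n : Int) (m : Int) (hBars : List Int) (vBars : List Int) : Int :=
  let side := min (pvMaxGapB hBars) (pvMaxGapB vBars)
  side * side

-- ===== PRECONDITION & SPEC =====
-- On inputs where hBars or vBars is empty, A returns an area of at least 4 (its counter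
-- starts at 1, counting a removable run in an empty list), while B counts a zero-length
-- segment and returns area 1, the intended value since no bar can be removed there.
def D_maximizeSquareHoleArea (n : Int) (m : Int) (hBars : List Int) (vBars : List Int) : Prop :=
  hBars = [] ∨ vBars = []
instance (n : Int) (m : Int) (hBars : List Int) (vBars : List Int) : Decidable (D_maximizeSquareHoleArea n m hBars vBars) := by unfold D_maximizeSquareHoleArea; infer_instance

def Spec_maximizeSquareHoleArea (n : Int) (m : Int) (hBars : List Int) (vBars : List Int) (out : Int) : Prop := ¬ D_maximizeSquareHoleArea n m hBars vBars → out = maximizeSquareHoleArea_alt n m hBars vBars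
instance (n : Int) (m : Int) (hBars : List Int) (vBars : List Int) (out : Int) : Decidable (Spec_maximizeSquareHoleArea n m hBars vBars out) := by unfold Spec_maximizeSquareHoleArea; infer_instance

def pvDiffWitness_maximizeSquareHoleArea : Int × Int × List Int × List Int := (2, 2, [], [])
def pvDiffWitnessOut_maximizeSquareHoleArea : Int × Int := (4, 1)

-- ===== CLAIM (what is proved, stated in full; the proofs are below) =====
def Claim_unchanged_maximizeSquareHoleArea : Prop := ∀ (n : Int) (m : Int) (hBars : List Int) (vBars : List Int), Dom_maximizeSquareHoleArea n m hBars vBars → Spec_maximizeSquareHoleArea n m hBars vBars (maximizeSquareHoleArea n m hBars vBars)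
def Claim_changed_maximizeSquareHoleArea : Prop := Dom_maximizeSquareHoleArea (pvDiffWitness_maximizeSquareHoleArea.1) (pvDiffWitness_maximizeSquareHoleArea.2.1) (pvDiffWitness_maximizeSquareHoleArea.2.2.1) (pvDiffWitness_maximizeSquareHoleArea.2.2.2) ∧ D_maximizeSquareHoleArea (pvDiffWitness_maximizeSquareHoleArea.1) (pvDiffWitness_maximizeSquareHoleArea.2.1) (pvDiffWitness_maximizeSquareHoleArea.2.2.1) (pvDiffWitness_maximizeSquareHoleArea.2.2.2) ∧ maximizeSquareHoleArea (pvDiffWitness_maximizeSquareHoleArea.1) (pvDiffWitness_maximizeSquareHoleArea.2.1) (pvDiffWitness_maximizeSquareHoleArea.2.2.1) (pvDiffWitness_maximizeSquareHoleArea.2.2.2) = pvDiffWitnessOut_maximizeSquareHoleArea.1 ∧ maximizeSquareHoleArea_alt (pvDiffWitness_maximizeSquareHoleArea.1) (pvDiffWitness_maximizeSquareHoleArea.2.1) (pvDiffWitness_maximizeSquareHoleArea.2.2.1) (pvDiffWitness_maximizeSquareHoleArea.2.2.2) = pvDiffWitnessOut_maximizeSquareHoleArea.2 ∧ pvDiffWitnessOut_maximizeSquareHoleArea.1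 ≠ pvDiffWitnessOut_maximizeSquareHoleArea.2
def Claim_exact_maximizeSquareHoleArea : Prop := ∀ (n : Int) (m : Int) (hBars : List Int) (vBars : List Int), Dom_maximizeSquareHoleArea n m hBars vBars → D_maximizeSquareHoleArea n m hBars vBars → maximizeSquareHoleArea n m hBars vBars ≠ maximizeSquareHoleArea_alt n m hBars vBars

-- ===== LEMMAS AND PROOFS =====
-- Plan: both gap computations are reduced, for a nonempty list, to the list of maximal
-- (+1)-chunk lengths of the sorted list (pvChunks):
--  * A-side: the indexed adjacent scan is pvScanA (pvIdx_foldl), whose running max is the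
--    fold of max over pvChunks (pvScanA_eq_chunks).
--  * B-side: the boundary differences ((bounds.zip …).map …) are pvDiffs (pvZip_diffs),
--    and the filtered break positions bracketed by k and len give exactly the chunk
--    lengths of the suffix (pvCuts_diffs); Python's max of that nonempty list equals A's
--    running max from 1 because chunk lengths are ≥ 1 (pvChunks_head).
-- For the difference theorem: A's gap is always ≥ 2 (pvFoldA_ge), B's gap on [] is 1.

def pvScanA : Int → List Int → Int × Int → Int × Int
  | _, [], lc => lc
  | prev, y :: ys, lc =>
    if y = prev + 1 then pvScanA y ys (lc.1, lc.2 + 1)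
    else pvScanA y ys (max lc.1 lc.2, 1)

def pvChunks : Int → Int → List Int → List Int
  | _, cur, [] => [cur]
  | prev, cur, y :: ys =>
    if y = prev + 1 then pvChunks y (cur + 1) ys
    else cur :: pvChunks y 1 ys

def pvDiffs : Int → List Int → List Int
  | _, [] => []
  | a, b :: L => (b - a) :: pvDiffs b L

lemma pvScanA_eq_chunks (xs : List Int) : ∀ (x L C : Int),
    (fun p : Int × Int => max p.1 p.2) (pvScanA x xs (L, C)) = (pvChunks x C xs).foldl max L := by
  induction xs with
  | nil => intro x L C; simp [pvScanA, pvChunks]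
  | cons y ys ih =>
    intro x L C
    by_cases h : y = x + 1 <;> simp [pvScanA, pvChunks, h, ih]

lemma pvIdx_foldl (s : List Int) : ∀ (n k : Nat) (st : Int × Int), k < s.length → s.length = k + 1 + n →
    (PySem.List.pyRange ((k : Int) + 1) (s.length : Int) 1).foldl
      (fun (lc : Int × Int) i =>
        if PySem.List.pyGetD s i 0 == PySem.List.pyGetD s (i - 1) 0 + 1 then (lc.1, lc.2 + 1)
        else (max lc.1 lc.2, 1)) st
    = pvScanA s[k]! (s.drop (k + 1)) st := by
  intro n
  induction n with
  | zero =>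
    intro k st hk hlen
    have h1 : PySem.List.pyRange ((k : Int) + 1) (s.length : Int) 1 = [] := by
      simp [PySem.List.pyRange]
      omega
    rw [h1]
    have h2 : s.drop (k + 1) = [] := List.drop_eq_nil_of_le (by omega)
    rw [h2]
    rfl
  | succ j ih =>
    intro k st hk hlen
    have hk1 : k + 1 < s.length := by omega
    have h1 : PySem.List.pyRange ((k : Int) + 1) (s.length : Int) 1
        = ((k : Int) + 1) :: PySem.List.pyRange ((k : Int) + 1 + 1) (s.length : Int) 1 :=
      PySem.List.pyRange_one_cons (by omega)
    rw [h1, List.foldl_cons]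
    have hg1 : PySem.List.pyGetD s ((k : Int) + 1) 0 = s[k + 1] := by
      rw [PySem.List.pyGetD_eq_getElem s 0 (by omega) (by omega)]
      simp only [show ((k : Int) + 1).toNat = k + 1 by omega]
    have hg0 : PySem.List.pyGetD s ((k : Int) + 1 - 1) 0 = s[k] := by
      rw [show ((k : Int) + 1 - 1) = (k : Int) by ring]
      rw [PySem.List.pyGetD_eq_getElem s 0 (by omega) (by omega)]
      simp only [show ((k : Int)).toNat = k by omega]
    have hdrop : s.drop (k + 1) = s[k + 1] :: s.drop (k + 2) := by
      rw [List.drop_eq_getElem_cons hk1]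
    have hcast : ((k : Int) + 1) = ((k + 1 : Nat) : Int) := by push_cast; ring
    rw [hg1, hg0, hdrop]
    have ihx := ih (k + 1) (if s[k + 1] == s[k] + 1 then (st.1, st.2 + 1) else (max st.1 st.2, 1)) hk1 (by omega)
    rw [hcast, ihx]
    simp only [pvScanA, beq_iff_eq]
    have hgetb : s[k + 1]! = s[k + 1] := getElem!_pos s (k + 1) hk1
    have hgetb' : s[k]! = s[k] := getElem!_pos s k hk
    rw [hgetb, hgetb']
    by_cases h : s[k + 1] = s[k] + 1 <;> simp [h]

lemma pvZip_diffs : ∀ (L : List Int) (a : Int),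
    (((a :: L).zip L).map (fun p : Int × Int => p.2 - p.1)) = pvDiffs a L := by
  intro L
  induction L with
  | nil => intro a; rfl
  | cons b L' ih =>
    intro a
    simp only [List.zip_cons_cons, List.map_cons, pvDiffs]
    rw [← ih b]

lemma pvChunks_head : ∀ (ys : List Int) (p c : Int), ∃ h t, pvChunks p c ys = h :: t ∧ c ≤ h := by
  intro ys
  induction ys with
  | nil => intro p c; exact ⟨c, [], rfl, le_refl c⟩
  | cons y ys ih =>
    intro p c
    by_cases hy : y = p + 1
    · obtain ⟨h, t, heq, hle⟩ := ih y (c + 1)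
      exact ⟨h, t, by simp only [pvChunks, if_pos hy]; exact heq, by omega⟩
    · exact ⟨c, pvChunks y 1 ys, by simp [pvChunks, hy], le_refl c⟩

lemma pvChunks_succ : ∀ (ys : List Int) (p c : Int),
    pvChunks p (c + 1) ys
      = (match pvChunks p c ys with | [] => [] | h :: t => (h + 1) :: t) := by
  intro ys
  induction ys with
  | nil => intro p c; rfl
  | cons y ys ih =>
    intro p c
    by_cases hy : y = p + 1
    · simp only [pvChunks, if_pos hy]
      exact ih y (c + 1)
    · simp only [pvChunks, if_neg hy]

-- The break positions of the suffix starting at index k, bracketed by k and len, have as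
-- consecutive differences exactly the chunk lengths of that suffix.
lemma pvCuts_diffs (s : List Int) : ∀ (n k : Nat), k < s.length → s.length = k + 1 + n →
    pvDiffs (k : Int)
      (((PySem.List.pyRange ((k : Int) + 1) (s.length : Int) 1).filter
        (fun i => !(PySem.List.pyGetD s i 0 == PySem.List.pyGetD s (i - 1) 0 + 1))) ++ [(s.length : Int)])
    = pvChunks s[k]! 1 (s.drop (k + 1)) := by
  intro n
  induction n with
  | zero =>
    intro k hk hlen
    have h1 : PySem.List.pyRange ((k : Int) + 1) (s.length : Int) 1 = [] := by
      simp [PySem.List.pyRange]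
      omega
    have h2 : s.drop (k + 1) = [] := List.drop_eq_nil_of_le (by omega)
    rw [h1, h2]
    simp only [List.filter_nil, List.nil_append, pvDiffs, pvChunks]
    rw [show ((s.length : Int) - k) = 1 by omega]
  | succ j ih =>
    intro k hk hlen
    have hk1 : k + 1 < s.length := by omega
    have h1 : PySem.List.pyRange ((k : Int) + 1) (s.length : Int) 1
        = ((k : Int) + 1) :: PySem.List.pyRange ((k : Int) + 1 + 1) (s.length : Int) 1 :=
      PySem.List.pyRange_one_cons (by omega)
    have hg1 : PySem.List.pyGetD s ((k : Int) + 1) 0 = s[k + 1] := by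
      rw [PySem.List.pyGetD_eq_getElem s 0 (by omega) (by omega)]
      simp only [show ((k : Int) + 1).toNat = k + 1 by omega]
    have hg0 : PySem.List.pyGetD s ((k : Int) + 1 - 1) 0 = s[k] := by
      rw [show ((k : Int) + 1 - 1) = (k : Int) by ring]
      rw [PySem.List.pyGetD_eq_getElem s 0 (by omega) (by omega)]
      simp only [show ((k : Int)).toNat = k by omega]
    have hdrop : s.drop (k + 1) = s[k + 1] :: s.drop (k + 2) := by
      rw [List.drop_eq_getElem_cons hk1]
    have hcast : ((k : Int) + 1) = ((k + 1 : Nat) : Int) := by push_cast; ring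
    have hgetb : s[k + 1]! = s[k + 1] := getElem!_pos s (k + 1) hk1
    have hgetb' : s[k]! = s[k] := getElem!_pos s k hk
    have ihx := ih (k + 1) hk1 (by omega)
    rw [hcast] at h1 ⊢
    rw [h1, List.filter_cons]
    rw [hdrop, hgetb']
    by_cases h : s[k + 1] = s[k] + 1
    · -- no break at k+1: the position is filtered out and the first chunk grows by one
      have hpred : (!(PySem.List.pyGetD s ((k + 1 : Nat) : Int) 0 == PySem.List.pyGetD s (((k + 1 : Nat) : Int) - 1) 0 + 1)) = false := by
        rw [show (((k + 1 : Nat) : Int) - 1) = ((k : Int) + 1 - 1) by push_cast; ring,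
          show ((k + 1 : Nat) : Int) = ((k : Int) + 1) by push_cast; ring, hg1, hg0]
        simp [h]
      rw [hpred]
      simp only [Bool.false_eq_true, if_false]
      rw [hgetb, show k + 1 + 1 = k + 2 from by omega] at ihx
      cases hF : ((PySem.List.pyRange (((k + 1 : Nat) : Int) + 1) (s.length : Int) 1).filter
          (fun i => !(PySem.List.pyGetD s i 0 == PySem.List.pyGetD s (i - 1) 0 + 1))) ++ [(s.length : Int)] with
      | nil => exact absurd hF (by simp)
      | cons c L =>
        rw [hF] at ihx
        simp only [pvDiffs] at ihx ⊢
        have hch : pvChunks s[k] 1 (s[k + 1] :: s.drop (k + 2))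
            = pvChunks s[k + 1] 2 (s.drop (k + 2)) := by
          simp [pvChunks, h]
        rw [hch, show (2 : Int) = 1 + 1 by norm_num, pvChunks_succ, ← ihx]
        dsimp only
        rw [show (c - (k : Int)) = (c - ((k + 1 : Nat) : Int)) + 1 by push_cast; ring]
    · -- break at k+1: it is kept as a boundary and closes a chunk of the accumulated length
      have hpred : (!(PySem.List.pyGetD s ((k + 1 : Nat) : Int) 0 == PySem.List.pyGetD s (((k + 1 : Nat) : Int) - 1) 0 + 1)) = true := by
        rw [show (((k + 1 : Nat) : Int) - 1) = ((k : Int) + 1 - 1) by push_cast; ring,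
          show ((k + 1 : Nat) : Int) = ((k : Int) + 1) by push_cast; ring, hg1, hg0]
        simp [h]
      rw [hpred]
      simp only [if_true]
      rw [hgetb, show k + 1 + 1 = k + 2 from by omega] at ihx
      simp only [List.cons_append, pvDiffs]
      rw [ihx]
      have hch : pvChunks s[k] 1 (s[k + 1] :: s.drop (k + 2))
          = 1 :: pvChunks s[k + 1] 1 (s.drop (k + 2)) := by
        simp [pvChunks, h]
      rw [hch, show ((k + 1 : Nat) : Int) - (k : Int) = 1 by push_cast; ring]

-- A's running (longest, curr) pair always keeps both components ≥ 1.
lemma pvFoldA_ge (s : List Int) (L : List Int) : ∀ (st : Int × Int), 1 ≤ st.1 → 1 ≤ st.2 →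
    1 ≤ (L.foldl (fun (lc : Int × Int) i =>
      if PySem.List.pyGetD s i 0 == PySem.List.pyGetD s (i - 1) 0 + 1 then (lc.1, lc.2 + 1)
      else (max lc.1 lc.2, 1)) st).1 ∧
    1 ≤ (L.foldl (fun (lc : Int × Int) i =>
      if PySem.List.pyGetD s i 0 == PySem.List.pyGetD s (i - 1) 0 + 1 then (lc.1, lc.2 + 1)
      else (max lc.1 lc.2, 1)) st).2 := by
  induction L with
  | nil => intro st h1 h2; exact ⟨h1, h2⟩
  | cons i L ih =>
    intro st h1 h2
    simp only [List.foldl_cons]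
    split
    · exact ih _ h1 (by omega)
    · exact ih _ (by simp; omega) (by omega)

lemma pvMaxGapA_ge (l : List Int) : 2 ≤ pvMaxGapA l := by
  simp only [pvMaxGapA]
  have := pvFoldA_ge (PySem.List.sorted l (fun x => x) false)
    (PySem.List.pyRange 1 ((PySem.List.sorted l (fun x => x) false).length : Int) 1)
    (1, 1) (by norm_num) (by norm_num)
  omega

-- The two gap computations agree on every nonempty list.
lemma pvGap_eq (l : List Int) (hl : l ≠ []) : pvMaxGapA l = pvMaxGapB l := by
  cases hcase : PySem.List.sorted l (fun x => x) false with
  | nil => exact absurd ((PySem.List.sorted_eq_nil_iff l _ false).mp hcase) hl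
  | cons w t =>
    -- A-side reduction to chunks
    simp only [pvMaxGapA, pvMaxGapB]
    rw [hcase]
    have hlen : 0 < (w :: t).length := by simp
    have hidx := pvIdx_foldl (w :: t) t.length 0 (1, 1) hlen
      (by simp only [List.length_cons]; omega)
    have h01 : ((0 : Nat) : Int) + 1 = 1 := by norm_num
    rw [h01] at hidx
    rw [hidx]
    have hget : (w :: t)[0]! = w := rfl
    have hdrop1 : (w :: t).drop 1 = t := rfl
    rw [hget, hdrop1]
    have hsc := pvScanA_eq_chunks t w 1 1
    dsimp only [] at hsc
    rw [hsc]
    -- B-side reduction to chunks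
    have hcuts := pvCuts_diffs (w :: t) t.length 0 hlen (by simp only [List.length_cons]; omega)
    rw [h01, Nat.cast_zero, hget, hdrop1] at hcuts
    have hzip : ∀ (L : List Int) (a : Int),
        ((a :: L).zip ((a :: L).drop 1)).map (fun p : Int × Int => p.2 - p.1) = pvDiffs a L := by
      intro L a
      rw [show (a :: L).drop 1 = L from rfl, pvZip_diffs]
    simp only [List.cons_append]
    rw [hzip, hcuts]
    obtain ⟨h, t2, heq, hge⟩ := pvChunks_head t w 1
    rw [heq, PySem.List.max?_id_cons]
    simp only [Option.getD_some, List.foldl_cons]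
    rw [show max (1 : Int) h = h by omega]

lemma pvMaxGapB_ge_one (l : List Int) : 1 ≤ pvMaxGapB l := by
  rcases eq_or_ne l [] with rfl | hl
  · decide
  · have := pvMaxGapA_ge l
    rw [pvGap_eq l hl] at this
    omega

-- ===== VERDICT (by name: the statements are the Claim_ definitions above) =====
theorem maximizeSquareHoleArea_spec : Claim_unchanged_maximizeSquareHoleArea := by
  intro n m hBars vBars _ hnd
  unfold D_maximizeSquareHoleArea at hnd
  push_neg at hnd
  unfold maximizeSquareHoleArea maximizeSquareHoleArea_alt
  rw [pvGap_eq hBars hnd.1, pvGap_eq vBars hnd.2]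

theorem maximizeSquareHoleArea_changed : Claim_changed_maximizeSquareHoleArea := by
  unfold Claim_changed_maximizeSquareHoleArea
  decide

theorem maximizeSquareHoleArea_tight : Claim_exact_maximizeSquareHoleArea := by
  intro n m hBars vBars _ hd
  unfold maximizeSquareHoleArea maximizeSquareHoleArea_alt
  intro heq
  have hA1 := pvMaxGapA_ge hBars
  have hA2 := pvMaxGapA_ge vBars
  have hsideA : 2 ≤ min (pvMaxGapA hBars) (pvMaxGapA vBars) := le_min hA1 hA2
  have hAge : 4 ≤ min (pvMaxGapA hBars) (pvMaxGapA vBars) * min (pvMaxGapA hBars) (pvMaxGapA vBars) := by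
    nlinarith
  have hBeq : min (pvMaxGapB hBars) (pvMaxGapB vBars) = 1 := by
    have hb1 := pvMaxGapB_ge_one hBars
    have hb2 := pvMaxGapB_ge_one vBars
    rcases hd with h | h
    · rw [h, show pvMaxGapB [] = 1 from by decide]
      omega
    · rw [h, show pvMaxGapB [] = 1 from by decide]
      omega
  rw [hBeq] at heq
  simp only [mul_one] at heq
  omega
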